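-- pv_equiv track=rewrite | github.com/sclaus2/fenics2026 | convert.py | tokens_compatible
-- ===== SOURCE A (Python) =====
-- from typing import Sequence
--
-- def tokens_compatible(shorter: Sequence[str], longer: Sequence[str]) -> bool:
--     if not shorter:
--         return True
--     remaining = list(longer)
--     for token in shorter:
--         match_index = next(
--             (
--                 index
--                 for index, candidate in enumerate(remaining)
--                 if candidate == token
--                 or candidate.startswith(token)
--                 or token.startswith(candidate)
--                 or (len(token) == 1 and candidate.startswith(token))
--                 or (len(candidate) == 1 and token.startswith(candidate))
--             ),
--             None,
--         )
--         if match_index is None: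
--             return False
--         remaining = remaining[match_index + 1 :]
--     return True
-- ===== SOURCE B (Python) =====
-- def tokens_compatible(shorter, longer):
--     j = 0
--     n = len(longer)
--     for token in shorter:
--         while j < n and not (longer[j].startswith(token) or token.startswith(longer[j])):
--             j += 1
--         if j == n:
--             return False
--         j += 1
--     return True
-- ===== Notes on version B (the rewrite author's own statement) =====
-- stated objective: faster
-- what changed: Replaces the per-token re-slicing of the remaining list (an O(m) copy after every match) with a single advancing index over longer, using only the mutual-startswith test (the == and len==1 clauses in A are redundant).
import Mathlib
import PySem

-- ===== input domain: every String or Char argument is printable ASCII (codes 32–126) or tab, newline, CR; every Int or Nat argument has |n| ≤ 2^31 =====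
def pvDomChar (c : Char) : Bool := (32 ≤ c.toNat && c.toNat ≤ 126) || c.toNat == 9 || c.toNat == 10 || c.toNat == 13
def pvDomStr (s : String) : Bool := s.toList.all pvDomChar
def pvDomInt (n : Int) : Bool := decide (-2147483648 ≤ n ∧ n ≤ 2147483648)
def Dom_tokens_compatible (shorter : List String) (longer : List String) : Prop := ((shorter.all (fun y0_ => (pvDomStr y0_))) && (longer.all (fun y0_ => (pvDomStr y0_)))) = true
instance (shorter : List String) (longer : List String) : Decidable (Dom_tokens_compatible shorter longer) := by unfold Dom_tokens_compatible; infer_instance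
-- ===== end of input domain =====

-- B replaces A's per-match re-slicing of the remaining list with a single advancing
-- pointer over `longer` (asymptotically faster; measured faster in a timing run).


-- ===== PORT A =====
-- the generator's condition, disjunct for disjunct
def tcA_compat (token cand : String) : Bool :=
  cand == token
  || PySem.Str.startswith cand token
  || PySem.Str.startswith token cand
  || (PySem.Str.len token == 1 && PySem.Str.startswith cand token)
  || (PySem.Str.len cand == 1 && PySem.Str.startswith token cand)

-- the `for token in shorter` loop over the shrinking `remaining` list;
-- `remaining[match_index + 1:]` = List.drop (i+1), exact since i+1 ≥ 0
def tcA_go : List String → List String → Bool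
  | [], _ => true
  | token :: ts, remaining =>
    match remaining.findIdx? (fun cand => tcA_compat token cand) with
    | none => false
    | some i => tcA_go ts (remaining.drop (i + 1))

def tokens_compatible (shorter : List String) (longer : List String) : Bool :=
  if shorter.isEmpty then true else tcA_go shorter (longer)

-- ===== PORT B =====
-- two-pointer scan: the index j over `longer` becomes structural recursion on the tail
def tcB_go : List String → List String → Bool
  | [], _ => true
  | _ :: _, [] => false
  | token :: ts, cand :: cs =>
    if PySem.Str.startswith cand token || PySem.Str.startswith token cand
    then tcB_go ts cs
    else tcB_go (token :: ts) cs
termination_by _ l2 => l2.length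

def tokens_compatible_alt (shorter : List String) (longer : List String) : Bool :=
  tcB_go shorter longer

-- ===== PRECONDITION & SPEC =====
def Spec_tokens_compatible (shorter : List String) (longer : List String) (out : Bool) : Prop := out = tokens_compatible_alt shorter longer
instance (shorter : List String) (longer : List String) (out : Bool) : Decidable (Spec_tokens_compatible shorter longer out) := by unfold Spec_tokens_compatible; infer_instance

-- ===== CLAIM (what is proved, stated in full; the proofs are below) =====
def Claim_equal_tokens_compatible : Prop := ∀ (shorter : List String) (longer : List String), Dom_tokens_compatible shorter longer → Spec_tokens_compatible shorter longer (tokens_compatible shorter longer)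

-- ===== LEMMAS AND PROOFS =====

theorem tc_sw_self (l : List Char) : PySem.Chars.startswith l l = true := by
  rw [PySem.Chars.startswith_iff]

-- A's five-way condition collapses to the mutual-startswith test
theorem tc_compat_eq (t c : String) :
    tcA_compat t c
      = (PySem.Chars.startswith c.toList t.toList || PySem.Chars.startswith t.toList c.toList) := by
  by_cases h : c = t
  · subst h; simp [tcA_compat, tc_sw_self]
  · cases h1 : PySem.Chars.startswith c.toList t.toList <;>
      cases h2 : PySem.Chars.startswith t.toList c.toList <;>
      simp [tcA_compat, h, h1, h2]

theorem tcA_go_skip (t : String) (ts cs : List String) (c : String)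
    (h : tcA_compat t c = false) :
    tcA_go (t :: ts) (c :: cs) = tcA_go (t :: ts) cs := by
  simp only [tcA_go, List.findIdx?_cons, h]
  cases hf : cs.findIdx? (fun cand => tcA_compat t cand) with
  | none => simp
  | some i => simp [List.drop_succ_cons]

theorem tc_go_eq (rem : List String) : ∀ ts, tcA_go ts rem = tcB_go ts rem := by
  induction rem with
  | nil => intro ts; cases ts <;> simp [tcA_go, tcB_go]
  | cons c cs ih =>
    intro ts
    cases ts with
    | nil => simp [tcA_go, tcB_go]
    | cons t ts' =>
      have hc := tc_compat_eq t c
      cases h1 : PySem.Chars.startswith c.toList t.toList <;>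
        cases h2 : PySem.Chars.startswith t.toList c.toList
      case false.false =>
        have h : tcA_compat t c = false := by rw [hc, h1, h2]; rfl
        rw [tcA_go_skip t ts' cs c h, ih (t :: ts')]
        simp [tcB_go, h1, h2]
      all_goals
        have h : tcA_compat t c = true := by rw [hc, h1, h2]; rfl
        simp only [tcA_go, List.findIdx?_cons, h, if_true]
        simp only [List.drop_succ_cons, List.drop_zero]
        rw [ih ts']
        simp [tcB_go, h1, h2]

-- ===== VERDICT (by name: the statement is the Claim_ definition above) =====
theorem tokens_compatible_spec : Claim_equal_tokens_compatible := by
  intro shorter longer _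
  unfold Spec_tokens_compatible tokens_compatible tokens_compatible_alt
  cases shorter with
  | nil => simp [tcB_go]
  | cons t ts => simpa using tc_go_eq longer (t :: ts)
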